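-- pv_equiv track=rewrite | github.com/DylanCkawalec/opgrok | webapp/app/genius_enhancements.py | suggest_template
-- ===== SOURCE A (Python) =====
-- from typing import Dict, Any, List, Optional
--
-- def suggest_template(user_prompt: str) -> Optional[str]:
--     """Suggest a template based on user prompt keywords"""
--     prompt_lower = user_prompt.lower()
--
--     if any(word in prompt_lower for word in ["email", "gmail", "slack"]):
--         return "email_to_slack"
--     elif any(word in prompt_lower for word in ["api", "sheets", "spreadsheet"]):
--         return "api_to_sheet"
--     elif any(word in prompt_lower for word in ["webhook", "form", "submit"]):
--         return "webhook_processor"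
--     elif any(word in prompt_lower for word in ["monitor", "check", "alert", "down"]):
--         return "monitoring_alert"
--
--     return None
-- ===== SOURCE B (Python) =====
-- from typing import Optional
--
-- # Flat keyword -> (priority, template) map, keywords in alphabetical order;
-- # the winner is the matched keyword with the smallest rule priority.
-- KEYWORD_PRIORITY = {
--     "alert": (3, "monitoring_alert"),
--     "api": (1, "api_to_sheet"),
--     "check": (3, "monitoring_alert"),
--     "down": (3, "monitoring_alert"),
--     "email": (0, "email_to_slack"),
--     "form": (2, "webhook_processor"),
--     "gmail": (0, "email_to_slack"),
--     "monitor": (3, "monitoring_alert"),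
--     "sheets": (1, "api_to_sheet"),
--     "slack": (0, "email_to_slack"),
--     "spreadsheet": (1, "api_to_sheet"),
--     "submit": (2, "webhook_processor"),
--     "webhook": (2, "webhook_processor"),
-- }
--
-- def suggest_template(user_prompt: str) -> Optional[str]:
--     """Suggest a template: minimum-priority matched keyword wins."""
--     prompt_lower = user_prompt.lower()
--     best = None
--     for kw, (prio, name) in KEYWORD_PRIORITY.items():
--         if kw in prompt_lower and (best is None or prio < best[0]):
--             best = (prio, name)
--     return best[1] if best is not None else None
-- ===== Notes on version B (the rewrite author's own statement) =====
-- stated objective: alternative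
-- what changed: Replaced the ordered if/elif chain over rule groups by a flat keyword->(priority,template) map scanned once in alphabetical order with a minimum-priority accumulator; the matched keyword of smallest rule priority determines the template, which equals A's first-matching-branch result.
import Mathlib
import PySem

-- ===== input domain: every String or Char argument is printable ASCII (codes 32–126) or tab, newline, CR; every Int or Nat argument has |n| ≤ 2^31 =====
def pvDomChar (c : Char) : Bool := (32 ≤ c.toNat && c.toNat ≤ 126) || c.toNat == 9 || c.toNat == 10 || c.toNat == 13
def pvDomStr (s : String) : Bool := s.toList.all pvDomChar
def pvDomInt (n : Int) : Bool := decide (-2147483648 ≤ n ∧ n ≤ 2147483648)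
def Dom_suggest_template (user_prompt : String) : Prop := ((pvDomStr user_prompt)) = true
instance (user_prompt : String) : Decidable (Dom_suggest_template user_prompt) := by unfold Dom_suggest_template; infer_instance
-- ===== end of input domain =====

-- B replaces A's ordered if/elif rule chain by a flat keyword→(priority,template) map in
-- alphabetical order, scanned once with a minimum-priority accumulator; alternative data
-- structure, same behaviour and cost.

-- ===== PORT A =====
def suggest_template (user_prompt : String) : Option String :=
  let prompt_lower := PySem.Str.lower user_prompt
  if ["email", "gmail", "slack"].any (fun word => PySem.Str.isIn word prompt_lower) then
    some "email_to_slack"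
  else if ["api", "sheets", "spreadsheet"].any (fun word => PySem.Str.isIn word prompt_lower) then
    some "api_to_sheet"
  else if ["webhook", "form", "submit"].any (fun word => PySem.Str.isIn word prompt_lower) then
    some "webhook_processor"
  else if ["monitor", "check", "alert", "down"].any (fun word => PySem.Str.isIn word prompt_lower) then
    some "monitoring_alert"
  else
    none

-- ===== PORT B =====
-- KEYWORD_PRIORITY from Source B: keyword → (rule priority, template), alphabetical insertion order
def keywordPriority : List (String × Int × String) :=
  [ ("alert", 3, "monitoring_alert"),
    ("api", 1, "api_to_sheet"),
    ("check", 3, "monitoring_alert"),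
    ("down", 3, "monitoring_alert"),
    ("email", 0, "email_to_slack"),
    ("form", 2, "webhook_processor"),
    ("gmail", 0, "email_to_slack"),
    ("monitor", 3, "monitoring_alert"),
    ("sheets", 1, "api_to_sheet"),
    ("slack", 0, "email_to_slack"),
    ("spreadsheet", 1, "api_to_sheet"),
    ("submit", 2, "webhook_processor"),
    ("webhook", 2, "webhook_processor") ]

-- loop body of Source B: 'if kw in prompt_lower and (best is None or prio < best[0]): best = (prio, name)'
-- (the match on best renders Python's short-circuit 'best is None or prio < best[0]')
def bestStep (prompt_lower : String) (best : Option (Int × String)) (kv : String × Int × String) :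
    Option (Int × String) :=
  let (kw, prio, name) := kv
  match best with
  | none => if PySem.Str.isIn kw prompt_lower then some (prio, name) else none
  | some (p, n) =>
      if PySem.Str.isIn kw prompt_lower && decide (prio < p) then some (prio, name) else some (p, n)

def suggest_template_alt (user_prompt : String) : Option String :=
  let prompt_lower := PySem.Str.lower user_prompt
  match keywordPriority.foldl (bestStep prompt_lower) none with
  | some b => some b.2
  | none => none

-- ===== PRECONDITION & SPEC =====
def Spec_suggest_template (user_prompt : String) (out : Option String) : Prop := out = suggest_template_alt user_prompt
instance (user_prompt : String) (out : Option String) : Decidable (Spec_suggest_template user_prompt out) := by unfold Spec_suggest_template; infer_instance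

-- ===== CLAIM (what is proved, stated in full; the proofs are below) =====
def Claim_equal_suggest_template : Prop := ∀ (user_prompt : String), Dom_suggest_template user_prompt → Spec_suggest_template user_prompt (suggest_template user_prompt)

-- ===== LEMMAS AND PROOFS =====

-- ===== VERDICT (by name: the statement is the Claim_ definition above) =====
set_option maxHeartbeats 1000000 in
theorem suggest_template_spec : Claim_equal_suggest_template := by
  intro user_prompt _
  unfold Spec_suggest_template suggest_template suggest_template_alt keywordPriority
  simp only [List.foldl, List.any_cons, List.any_nil, bestStep, Bool.or_false]
  generalize PySem.Str.isIn "email" (PySem.Str.lower user_prompt) = b1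
  generalize PySem.Str.isIn "gmail" (PySem.Str.lower user_prompt) = b2
  generalize PySem.Str.isIn "slack" (PySem.Str.lower user_prompt) = b3
  generalize PySem.Str.isIn "api" (PySem.Str.lower user_prompt) = b4
  generalize PySem.Str.isIn "sheets" (PySem.Str.lower user_prompt) = b5
  generalize PySem.Str.isIn "spreadsheet" (PySem.Str.lower user_prompt) = b6
  generalize PySem.Str.isIn "webhook" (PySem.Str.lower user_prompt) = b7
  generalize PySem.Str.isIn "form" (PySem.Str.lower user_prompt) = b8
  generalize PySem.Str.isIn "submit" (PySem.Str.lower user_prompt) = b9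
  generalize PySem.Str.isIn "monitor" (PySem.Str.lower user_prompt) = b10
  generalize PySem.Str.isIn "check" (PySem.Str.lower user_prompt) = b11
  generalize PySem.Str.isIn "alert" (PySem.Str.lower user_prompt) = b12
  generalize PySem.Str.isIn "down" (PySem.Str.lower user_prompt) = b13
  revert b1 b2 b3 b4 b5 b6 b7 b8 b9 b10 b11 b12 b13
  decide
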